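-- pv_equiv track=rewrite | github.com/aaronrausch/advent-of-code | 2021/2021-12-13.py | create_paper
-- ===== SOURCE A (Python) =====
-- def create_paper(dots):
--     x_axis = max(x for x, _ in dots) + 1
--     y_axis = max(y for _, y in dots) + 1
--     paper = [['.' for _ in range(x_axis)] for _ in range(y_axis)]
--     for dot in dots:
--         x, y = dot
--         paper[y][x] = '#'
--     return paper
-- ===== SOURCE B (Python) =====
-- def create_paper(dots):
--     x_axis = max(x for x, _ in dots) + 1
--     y_axis = max(y for _, y in dots) + 1
--     # group the marked x positions by row, then emit each row as runs of '.'
--     # between consecutive marks -- no grid is allocated up front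
--     marks = {}
--     for x, y in dots:
--         marks.setdefault(y, set()).add(x)
--     rows = []
--     for y in range(y_axis):
--         row = []
--         prev = 0
--         for x in sorted(marks.get(y, ())):
--             row.extend(['.'] * (x - prev))
--             row.append('#')
--             prev = x + 1
--         row.extend(['.'] * (x_axis - prev))
--         rows.append(row)
--     return rows
-- ===== Notes on version B (the rewrite author's own statement) =====
-- stated objective: alternative
-- what changed: A allocates a full grid of '.' and mutates paper[y][x] per dot; B never allocates a grid: it groups the marked x positions by row in a dict of sets and emits each row left-to-right as runs of '.' between the sorted marks. Pre_ excludes the empty list (A's max raises ValueError) and dots with a negative coordinate, where A's value comes from Python's accidental negative-index wraparound on assignment.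
-- outside the precondition, e.g. on create_paper([(0, 0), (-1, 0)]): A returns [['#']], B returns [['#', '#']]
import Mathlib
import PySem

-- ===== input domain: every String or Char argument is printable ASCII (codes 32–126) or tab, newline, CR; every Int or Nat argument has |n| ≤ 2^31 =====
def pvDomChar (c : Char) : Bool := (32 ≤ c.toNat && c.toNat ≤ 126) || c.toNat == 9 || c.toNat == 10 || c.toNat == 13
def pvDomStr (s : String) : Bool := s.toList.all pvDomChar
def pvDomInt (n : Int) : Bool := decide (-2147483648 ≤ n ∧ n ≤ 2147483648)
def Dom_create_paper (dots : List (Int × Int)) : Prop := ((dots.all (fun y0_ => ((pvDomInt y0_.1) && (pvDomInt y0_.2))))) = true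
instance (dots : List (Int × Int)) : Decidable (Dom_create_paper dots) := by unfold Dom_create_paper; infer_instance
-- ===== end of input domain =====

-- B replaces A's allocate-then-mutate grid by grouping the marked x positions per row
-- in a dict of sets and emitting each row as runs of '.' between the sorted marks.

-- ===== PORT A =====
def create_paper (dots : List (Int × Int)) : List (List String) :=
  let x_axis : Int := (PySem.List.max? (dots.map (fun d => d.1)) (fun v => v)).getD 0 + 1
  let y_axis : Int := (PySem.List.max? (dots.map (fun d => d.2)) (fun v => v)).getD 0 + 1
  let paper : List (List String) :=
    (PySem.List.pyRange 0 y_axis).map (fun _ => (PySem.List.pyRange 0 x_axis).map (fun _ => "."))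
  dots.foldl (fun paper dot =>
      let x := dot.1
      let y := dot.2
      PySem.List.pySetD paper y (PySem.List.pySetD ((PySem.List.pyGet? paper y).getD []) x "#"))
    paper

-- ===== PORT B =====
def create_paper_alt (dots : List (Int × Int)) : List (List String) :=
  let x_axis : Int := (PySem.List.max? (dots.map (fun d => d.1)) (fun v => v)).getD 0 + 1
  let y_axis : Int := (PySem.List.max? (dots.map (fun d => d.2)) (fun v => v)).getD 0 + 1
  -- marks.setdefault(y, set()).add(x): value- and key-order-exact as insert of the grown set
  let marks : PySem.Dict Int (PySem.Set Int) :=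
    dots.foldl (fun d p => d.insert p.2 (PySem.Set.add (d.getD p.2 PySem.Set.empty) p.1))
      PySem.Dict.empty
  (PySem.List.pyRange 0 y_axis).foldl (fun rows y =>
    let rp := (PySem.List.sorted (marks.getD y PySem.Set.empty) (fun v => v)).foldl
        (fun (rp : List String × Int) x =>
          (rp.1 ++ List.replicate (x - rp.2).toNat "." ++ ["#"], x + 1)) ([], 0)
    rows ++ [rp.1 ++ List.replicate (x_axis - rp.2).toNat "."]) []

-- ===== PRECONDITION & SPEC =====
-- Pre_ excludes the empty list, on which A's max(...) raises ValueError, and dot lists with a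
-- negative coordinate, where A either raises IndexError or returns a grid shaped by Python's
-- accidental negative-index wraparound on the assignment paper[y][x] = '#'.
def Pre_create_paper (dots : List (Int × Int)) : Prop :=
  dots ≠ [] ∧ ∀ d ∈ dots, 0 ≤ d.1 ∧ 0 ≤ d.2
instance (dots : List (Int × Int)) : Decidable (Pre_create_paper dots) := by unfold Pre_create_paper; infer_instance

def pvWitness_create_paper : (List (Int × Int)) := [(6, 0), (2, 4), (0, 1)]

def Spec_create_paper (dots : List (Int × Int)) (out : List (List String)) : Prop := out = create_paper_alt dots
instance (dots : List (Int × Int)) (out : List (List String)) : Decidable (Spec_create_paper dots out) := by unfold Spec_create_paper; infer_instance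

-- ===== CLAIM (what is proved, stated in full; the proofs are below) =====
def Claim_equal_create_paper : Prop := ∀ (dots : List (Int × Int)), Dom_create_paper dots → Pre_create_paper dots → Spec_create_paper dots (create_paper dots)

-- ===== LEMMAS AND PROOFS =====

theorem pvMax_cons (a : Int) (t : List Int) :
    ∃ m, PySem.List.max? (a :: t) (fun v => v) = some m ∧ m ∈ (a :: t) ∧ a ≤ m := by
  induction t generalizing a with
  | nil => exact ⟨a, by simp [PySem.List.max?, List.foldl], by simp, le_refl a⟩
  | cons b t ih =>
    obtain ⟨m, hm, hmem, hle⟩ := ih (max a b)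
    refine ⟨m, ?_, ?_, le_trans (le_max_left a b) hle⟩
    · simp only [PySem.List.max?, List.foldl] at hm ⊢
      by_cases hab : a < b
      · simpa [hab, max_eq_right hab.le] using hm
      · simpa [hab, max_eq_left (not_lt.mp hab)] using hm
    · rw [List.mem_cons] at hmem
      rcases hmem with h | h
      · rcases le_total a b with hab | hab
        · rw [max_eq_right hab] at h; simp [h]
        · rw [max_eq_left hab] at h; simp [h]
      · simp [h]

theorem pvMax_ne {xs : List Int} (h : xs ≠ []) :
    ∃ m, PySem.List.max? xs (fun v => v) = some m ∧ m ∈ xs := by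
  cases xs with
  | nil => exact absurd rfl h
  | cons a t =>
    obtain ⟨m, hm, hmem, _⟩ := pvMax_cons a t
    exact ⟨m, hm, hmem⟩

theorem pvIdx_mod {n : Nat} {i : Int} (hn : 0 < n) (h1 : -(n:Int) ≤ i) (h2 : i < n) :
    PySem.List.pyIdx? n i = some (PySem.Int.mod i n).toNat := by
  rw [PySem.Int.mod_eq_emod_of_pos (by exact_mod_cast hn)]
  simp [PySem.List.pyIdx?]
  split_ifs with h3 <;> try omega
  · rw [Int.emod_eq_of_lt h3 h2]
  · have he : i % (n:Int) = i + n := by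
      have h5 : (i + (n:Int)) % (n:Int) = i % (n:Int) := by
        have := Int.add_mul_emod_self_left i (n:Int) 1
        simp only [mul_one] at this
        exact this
      have h6 : (i + (n:Int)) % (n:Int) = i + n := Int.emod_eq_of_lt (by omega) (by omega)
      omega
    rw [he]; congr 1; omega

theorem pvIdx_mod' {Y : Int} (hY : 0 < Y) {n : Nat} (hn : (n:Int) = Y) {i : Int}
    (h1 : -Y ≤ i) (h2 : i < Y) :
    PySem.List.pyIdx? n i = some (PySem.Int.mod i Y).toNat := by
  subst hn
  exact pvIdx_mod (by exact_mod_cast hY) h1 h2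

-- the marking condition: dot d lands on cell (column j, row i)
abbrev pvHits (X Y : Int) (ds : List (Int × Int)) (j i : Nat) : Prop :=
  ∃ d ∈ ds, (PySem.Int.mod d.1 X).toNat = j ∧ (PySem.Int.mod d.2 Y).toNat = i

theorem pvFold_cells (X Y : Int) (hX : 0 < X) (hY : 0 < Y) :
    ∀ (ds : List (Int × Int)) (g : List (List String)),
      g.length = Y.toNat → (∀ r ∈ g, r.length = X.toNat) →
      (∀ d ∈ ds, -X ≤ d.1 ∧ d.1 < X ∧ -Y ≤ d.2 ∧ d.2 < Y) →
      (ds.foldl (fun paper dot =>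
          let x := dot.1
          let y := dot.2
          PySem.List.pySetD paper y (PySem.List.pySetD ((PySem.List.pyGet? paper y).getD []) x "#")) g).length = Y.toNat ∧
      (∀ r ∈ (ds.foldl (fun paper dot =>
          let x := dot.1
          let y := dot.2
          PySem.List.pySetD paper y (PySem.List.pySetD ((PySem.List.pyGet? paper y).getD []) x "#")) g), r.length = X.toNat) ∧
      ∀ i j : Nat, i < Y.toNat → j < X.toNat →
        ((ds.foldl (fun paper dot =>
          let x := dot.1
          let y := dot.2
          PySem.List.pySetD paper y (PySem.List.pySetD ((PySem.List.pyGet? paper y).getD []) x "#")) g)[i]?.bind (fun r => r[j]?)) =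
          if pvHits X Y ds j i then some "#" else g[i]?.bind (fun r => r[j]?) := by
  intro ds
  induction ds with
  | nil =>
    intro g hlen hrows _
    refine ⟨hlen, hrows, ?_⟩
    intro i j _ _
    simp [pvHits]
  | cons d ds ih =>
    intro g hlen hrows hd
    obtain ⟨hdx1, hdx2, hdy1, hdy2⟩ := hd d (List.mem_cons_self ..)
    set iy := (PySem.Int.mod d.2 Y).toNat with hiy
    set ix := (PySem.Int.mod d.1 X).toNat with hix
    have hiy_lt : iy < Y.toNat := by
      have h1 := PySem.Int.mod_nonneg d.2 hY
      have h2 := PySem.Int.mod_lt d.2 hY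
      omega
    have hrow : g[iy]? = some (g[iy]'(by omega)) := List.getElem?_eq_getElem (by omega)
    have hrowlen : (g[iy]'(by omega)).length = X.toNat :=
      hrows _ (List.getElem_mem _)
    have hix_lt : ix < X.toNat := by
      have h1 := PySem.Int.mod_nonneg d.1 hX
      have h2 := PySem.Int.mod_lt d.1 hX
      omega
    have hYc : ((Y.toNat : Nat) : Int) = Y := Int.toNat_of_nonneg hY.le
    have hgety : PySem.List.pyGet? g d.2 = some (g[iy]'(by omega)) := by
      simp only [PySem.List.pyGet?]
      rw [pvIdx_mod' hY (by rw [hlen]; exact hYc) hdy1 hdy2]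
      simp only [Option.bind_some, ← hiy]
      exact hrow
    have hstep : (let x := d.1
          let y := d.2
          PySem.List.pySetD g y (PySem.List.pySetD ((PySem.List.pyGet? g y).getD []) x "#"))
        = g.set iy ((g[iy]'(by omega)).set ix "#") := by
      show PySem.List.pySetD g d.2 (PySem.List.pySetD ((PySem.List.pyGet? g d.2).getD []) d.1 "#")
        = g.set iy ((g[iy]'(by omega)).set ix "#")
      simp only [hgety, Option.getD_some]
      unfold PySem.List.pySetD PySem.List.pySet?
      rw [pvIdx_mod' hX (by rw [hrowlen]; exact Int.toNat_of_nonneg hX.le) hdx1 hdx2]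
      rw [pvIdx_mod' hY (by rw [hlen]; exact hYc) hdy1 hdy2]
      simp [← hix, ← hiy]
    rw [List.foldl_cons, hstep]
    have hlen1 : (g.set iy ((g[iy]'(by omega)).set ix "#")).length = Y.toNat := by
      rw [List.length_set]; exact hlen
    have hrows1 : ∀ r ∈ g.set iy ((g[iy]'(by omega)).set ix "#"), r.length = X.toNat := by
      intro r hr
      rcases List.mem_or_eq_of_mem_set hr with h | h
      · exact hrows r h
      · rw [h, List.length_set]; exact hrowlen
    have hd1 : ∀ d' ∈ ds, -X ≤ d'.1 ∧ d'.1 < X ∧ -Y ≤ d'.2 ∧ d'.2 < Y :=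
      fun d' h => hd d' (List.mem_cons_of_mem _ h)
    obtain ⟨L1, L2, L3⟩ := ih (g.set iy ((g[iy]'(by omega)).set ix "#")) hlen1 hrows1 hd1
    refine ⟨L1, L2, ?_⟩
    intro i j hi hj
    rw [L3 i j hi hj]
    have hhits : pvHits X Y (d :: ds) j i ↔ (ix = j ∧ iy = i) ∨ pvHits X Y ds j i := by
      simp only [pvHits, List.mem_cons]
      constructor
      · rintro ⟨d', (rfl | h), hji⟩
        · exact Or.inl ⟨hji.1, hji.2⟩
        · exact Or.inr ⟨d', h, hji⟩
      · rintro (⟨h1, h2⟩ | ⟨d', h, hji⟩)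
        · exact ⟨d, Or.inl rfl, h1, h2⟩
        · exact ⟨d', Or.inr h, hji⟩
    have hcell : ((g.set iy ((g[iy]'(by omega)).set ix "#"))[i]?.bind (fun r => r[j]?)) =
        if ix = j ∧ iy = i then some "#" else g[i]?.bind (fun r => r[j]?) := by
      rw [List.getElem?_set]
      by_cases hiy_eq : iy = i
      · subst hiy_eq
        rw [if_pos rfl, if_pos (show iy < g.length by omega), Option.bind_some,
          List.getElem?_set]
        by_cases hix_eq : ix = j
        · subst hix_eq
          rw [if_pos rfl, if_pos (show ix < g[iy].length by omega), if_pos ⟨rfl, rfl⟩]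
        · rw [if_neg hix_eq, if_neg (fun h => hix_eq h.1), hrow, Option.bind_some]
      · rw [if_neg hiy_eq, if_neg (fun h => hiy_eq h.2)]
    rw [hcell]
    by_cases hds : pvHits X Y ds j i
    · simp [hds, hhits]
    · by_cases hdc : ix = j ∧ iy = i
      · simp [hds, hdc, hhits]
      · simp [hds, hdc, hhits]

-- ---- B-side lemmas ----

-- the run-length row builder: '.' gaps between the strictly increasing marks, then the tail
def pvBuildRow (X : Int) : List Int → Int → List String
  | [], prev => List.replicate (X - prev).toNat "."
  | x :: t, prev => List.replicate (x - prev).toNat "." ++ "#" :: pvBuildRow X t (x + 1)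

theorem pvFold_buildRow (X : Int) (xs : List Int) : ∀ (acc : List String) (prev : Int),
    (xs.foldl (fun (rp : List String × Int) x =>
        (rp.1 ++ List.replicate (x - rp.2).toNat "." ++ ["#"], x + 1)) (acc, prev)).1
      ++ List.replicate (X - (xs.foldl (fun (rp : List String × Int) x =>
        (rp.1 ++ List.replicate (x - rp.2).toNat "." ++ ["#"], x + 1)) (acc, prev)).2).toNat "."
    = acc ++ pvBuildRow X xs prev := by
  induction xs with
  | nil => intro acc prev; simp [pvBuildRow]
  | cons x t ih =>
    intro acc prev
    rw [List.foldl_cons]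
    have := ih (acc ++ List.replicate (x - prev).toNat "." ++ ["#"]) (x + 1)
    rw [this]
    simp [pvBuildRow]

theorem pvBuildRow_get (X : Int) (xs : List Int) : ∀ (prev : Int), 0 ≤ prev → prev ≤ X →
    xs.Pairwise (· < ·) → (∀ x ∈ xs, prev ≤ x ∧ x < X) →
    (pvBuildRow X xs prev).length = (X - prev).toNat ∧
    ∀ k : Nat, k < (X - prev).toNat →
      (pvBuildRow X xs prev)[k]? = some (if (prev + (k:Int)) ∈ xs then "#" else ".") := by
  induction xs with
  | nil =>
    intro prev _ _ _ _
    refine ⟨by simp [pvBuildRow], ?_⟩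
    intro k hk
    simp [pvBuildRow, hk]
  | cons x t ih =>
    intro prev hprev0 hprevX hpw hbd
    obtain ⟨hx1, hx2⟩ := hbd x (List.mem_cons_self ..)
    have hhead : ∀ z ∈ t, x < z := (List.pairwise_cons.mp hpw).1
    have hbd' : ∀ z ∈ t, x + 1 ≤ z ∧ z < X := by
      intro z hz
      exact ⟨by have := hhead z hz; omega, (hbd z (List.mem_cons_of_mem _ hz)).2⟩
    obtain ⟨ihlen, ihget⟩ := ih (x + 1) (by omega) (by omega)
      (List.pairwise_cons.mp hpw).2 hbd'
    have hlen : (pvBuildRow X (x :: t) prev).length = (X - prev).toNat := by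
      simp [pvBuildRow, ihlen]
      omega
    refine ⟨hlen, ?_⟩
    intro k hk
    show (List.replicate (x - prev).toNat "." ++ "#" :: pvBuildRow X t (x + 1))[k]? = _
    by_cases h1 : k < (x - prev).toNat
    · rw [List.getElem?_append_left (by simpa using h1)]
      have hnotmem : (prev + (k:Int)) ∉ x :: t := by
        intro hmem
        rcases List.mem_cons.mp hmem with h | h
        · omega
        · have := hhead _ h; omega
      have hrep : (List.replicate (x - prev).toNat ("." : String))[k]? = some "." := by
        simp [h1]
      rw [hrep, if_neg hnotmem]
    · rw [List.getElem?_append_right (by simpa using not_lt.mp h1)]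
      simp only [List.length_replicate]
      by_cases h2 : k = (x - prev).toNat
      · rw [show k - (x - prev).toNat = 0 from by omega]
        rw [List.getElem?_cons_zero]
        have hxeq : prev + (k:Int) = x := by omega
        rw [if_pos (by rw [hxeq]; exact List.mem_cons_self ..)]
      · have h3 : (x - prev).toNat < k := by omega
        rw [show k - (x - prev).toNat = (k - (x - prev).toNat - 1) + 1 from by omega]
        rw [List.getElem?_cons_succ]
        have h5 : (k - (x - prev).toNat - 1) < (X - (x + 1)).toNat := by omega
        rw [ihget _ h5]
        rw [show (x + 1) + ((k - (x - prev).toNat - 1 : Nat) : Int) = prev + (k : Int) from by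
          omega]
        have h8 : prev + (k:Int) ≠ x := by omega
        simp [List.mem_cons, h8]

-- the dict built by the grouping loop: per-key nodup sets whose membership is 'some dot hits (x, y)'
theorem pvMarks_spec (dots : List (Int × Int)) :
    ∀ (d : PySem.Dict Int (PySem.Set Int)),
      (∀ y : Int, (d.getD y PySem.Set.empty).Nodup) →
      ∀ y : Int,
        (((dots.foldl (fun d p => d.insert p.2 (PySem.Set.add (d.getD p.2 PySem.Set.empty) p.1)) d).getD y PySem.Set.empty).Nodup) ∧
        (∀ x : Int, x ∈ (dots.foldl (fun d p => d.insert p.2 (PySem.Set.add (d.getD p.2 PySem.Set.empty) p.1)) d).getD y PySem.Set.empty ↔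
          x ∈ d.getD y PySem.Set.empty ∨ ∃ p ∈ dots, p.2 = y ∧ p.1 = x) := by
  induction dots with
  | nil =>
    intro d hd y
    refine ⟨hd y, ?_⟩
    intro x
    simp
  | cons p t ih =>
    intro d hd y
    rw [List.foldl_cons]
    have hd' : ∀ y : Int, ((d.insert p.2 (PySem.Set.add (d.getD p.2 PySem.Set.empty) p.1)).getD y PySem.Set.empty).Nodup := by
      intro yy
      by_cases hy : yy = p.2
      · subst hy
        rw [PySem.Dict.getD_insert_self]
        exact PySem.Set.nodup_add _ _ (hd p.2)
      · rw [PySem.Dict.getD_insert_of_ne _ _ _ hy]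
        exact hd yy
    obtain ⟨ihn, ihm⟩ := ih (d.insert p.2 (PySem.Set.add (d.getD p.2 PySem.Set.empty) p.1)) hd' y
    refine ⟨ihn, ?_⟩
    intro x
    rw [ihm x]
    by_cases hy : y = p.2
    · subst hy
      rw [PySem.Dict.getD_insert_self, PySem.Set.mem_add]
      constructor
      · rintro ((h | h) | h)
        · exact Or.inl h
        · exact Or.inr ⟨p, List.mem_cons_self .., rfl, h.symm⟩
        · obtain ⟨q, hq, h1, h2⟩ := h
          exact Or.inr ⟨q, List.mem_cons_of_mem _ hq, h1, h2⟩
      · rintro (h | ⟨q, hq, h1, h2⟩)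
        · exact Or.inl (Or.inl h)
        · rcases List.mem_cons.mp hq with rfl | hq
          · exact Or.inl (Or.inr h2.symm)
          · exact Or.inr ⟨q, hq, h1, h2⟩
    · rw [PySem.Dict.getD_insert_of_ne _ _ _ hy]
      constructor
      · rintro (h | ⟨q, hq, h1, h2⟩)
        · exact Or.inl h
        · exact Or.inr ⟨q, List.mem_cons_of_mem _ hq, h1, h2⟩
      · rintro (h | ⟨q, hq, h1, h2⟩)
        · exact Or.inl h
        · rcases List.mem_cons.mp hq with rfl | hq'
          · exact absurd h1.symm hy
          · exact Or.inr ⟨q, hq', h1, h2⟩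

theorem pvSorted_lt {s : List Int} (h : s.Nodup) :
    (PySem.List.sorted s (fun v => v)).Pairwise (· < ·) := by
  have h1 := PySem.List.sorted_pairwise s (fun v => v)
  have h2 : (PySem.List.sorted s (fun v => v)).Nodup :=
    ((PySem.List.sorted_perm s (fun v => v) false).nodup_iff).mpr h
  exact (h1.and h2).imp (fun hab => lt_of_le_of_ne hab.1 hab.2)

theorem pvMain (dots : List (Int × Int)) (hne : dots ≠ [])
    (hall : ∀ d ∈ dots, 0 ≤ d.1 ∧ 0 ≤ d.2) :
    create_paper dots = create_paper_alt dots := by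
  unfold create_paper create_paper_alt
  simp only []
  set MX : Int := (PySem.List.max? (dots.map (fun d => d.1)) (fun v => v)).getD 0 with hMX
  set MY : Int := (PySem.List.max? (dots.map (fun d => d.2)) (fun v => v)).getD 0 with hMY
  obtain ⟨mx, hmx, hmxmem⟩ := pvMax_ne (xs := dots.map (fun d => d.1)) (by simpa using hne)
  obtain ⟨my, hmy, hmymem⟩ := pvMax_ne (xs := dots.map (fun d => d.2)) (by simpa using hne)
  have hMXe : MX = mx := by rw [hMX, hmx]; rfl
  have hMYe : MY = my := by rw [hMY, hmy]; rfl
  have hub1 : ∀ d ∈ dots, d.1 ≤ MX := by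
    intro d hd
    rw [hMXe]
    exact PySem.List.max?_isMax hmx d.1 (List.mem_map_of_mem hd)
  have hub2 : ∀ d ∈ dots, d.2 ≤ MY := by
    intro d hd
    rw [hMYe]
    exact PySem.List.max?_isMax hmy d.2 (List.mem_map_of_mem hd)
  have hMX0 : 0 ≤ MX := by
    obtain ⟨d, hd, hd1⟩ := List.mem_map.mp hmxmem
    have := (hall d hd).1
    rw [hMXe] at *
    omega
  have hMY0 : 0 ≤ MY := by
    obtain ⟨d, hd, hd2⟩ := List.mem_map.mp hmymem
    have := (hall d hd).2
    rw [hMYe] at *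
    omega
  have hX : (0:Int) < MX + 1 := by omega
  have hY : (0:Int) < MY + 1 := by omega
  have hrange : ∀ d ∈ dots, -(MX+1) ≤ d.1 ∧ d.1 < MX+1 ∧ -(MY+1) ≤ d.2 ∧ d.2 < MY+1 := by
    intro d hd
    have h1 := (hall d hd).1
    have h2 := (hall d hd).2
    have h3 := hub1 d hd
    have h4 := hub2 d hd
    exact ⟨by omega, by omega, by omega, by omega⟩
  -- the initial grid of A
  have hg0len : ((PySem.List.pyRange 0 (MY+1)).map
      (fun _ => (PySem.List.pyRange 0 (MX+1)).map (fun _ => ("." : String)))).length = (MY+1).toNat := by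
    simp [PySem.List.length_pyRange_one]
  have hg0rows : ∀ r ∈ (PySem.List.pyRange 0 (MY+1)).map
      (fun _ => (PySem.List.pyRange 0 (MX+1)).map (fun _ => ("." : String))), r.length = (MX+1).toNat := by
    intro r hr
    obtain ⟨_, _, rfl⟩ := List.mem_map.mp hr
    simp [PySem.List.length_pyRange_one]
  obtain ⟨L1, L2, L3⟩ := pvFold_cells (MX+1) (MY+1) hX hY dots _ hg0len hg0rows hrange
  -- the dict of B
  set marks : PySem.Dict Int (PySem.Set Int) :=
    dots.foldl (fun d p => d.insert p.2 (PySem.Set.add (d.getD p.2 PySem.Set.empty) p.1))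
      PySem.Dict.empty with hmarks
  have hmspec := pvMarks_spec dots PySem.Dict.empty (by intro y; simp [PySem.Dict.getD_empty])
  -- B's loop is a map of run-length rows
  have hBmap : (PySem.List.pyRange 0 (MY+1)).foldl (fun rows y =>
      let rp := (PySem.List.sorted (marks.getD y PySem.Set.empty) (fun v => v)).foldl
          (fun (rp : List String × Int) x =>
            (rp.1 ++ List.replicate (x - rp.2).toNat "." ++ ["#"], x + 1)) ([], 0)
      rows ++ [rp.1 ++ List.replicate ((MX+1) - rp.2).toNat "."]) []
      = (PySem.List.pyRange 0 (MY+1)).map (fun y =>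
          pvBuildRow (MX+1) (PySem.List.sorted (marks.getD y PySem.Set.empty) (fun v => v)) 0) := by
    rw [PySem.List.foldl_append_singleton_eq_map (f := fun y =>
      let rp := (PySem.List.sorted (marks.getD y PySem.Set.empty) (fun v => v)).foldl
          (fun (rp : List String × Int) x =>
            (rp.1 ++ List.replicate (x - rp.2).toNat "." ++ ["#"], x + 1)) ([], 0)
      rp.1 ++ List.replicate ((MX+1) - rp.2).toNat ".")]
    simp only [List.nil_append]
    apply List.map_congr_left
    intro y _
    have := pvFold_buildRow (MX+1)
      (PySem.List.sorted (marks.getD y PySem.Set.empty) (fun v => v)) [] 0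
    simpa using this
  rw [hBmap]
  -- facts about each row's sorted marks
  have hrowfacts : ∀ i : Nat, i < (MY+1).toNat →
      let xs := PySem.List.sorted (marks.getD (i:Int) PySem.Set.empty) (fun v => v)
      xs.Pairwise (· < ·) ∧ (∀ x ∈ xs, 0 ≤ x ∧ x < MX+1) ∧
      (∀ x : Int, x ∈ xs ↔ ∃ p ∈ dots, p.2 = (i:Int) ∧ p.1 = x) := by
    intro i hi
    obtain ⟨hn, hm⟩ := hmspec (i:Int)
    have hmem : ∀ x : Int, x ∈ PySem.List.sorted (marks.getD (i:Int) PySem.Set.empty) (fun v => v) ↔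
        ∃ p ∈ dots, p.2 = (i:Int) ∧ p.1 = x := by
      intro x
      rw [PySem.List.mem_sorted]
      rw [hm x]
      simp [PySem.Dict.getD_empty]
    refine ⟨pvSorted_lt hn, ?_, hmem⟩
    intro x hx
    obtain ⟨p, hp, h1, h2⟩ := (hmem x).mp hx
    have := hall p hp
    have := hub1 p hp
    omega
  -- elementwise comparison
  apply List.ext_getElem?
  intro i
  by_cases hi : i < (MY+1).toNat
  · have hilt : i < (dots.foldl (fun paper dot =>
        let x := dot.1
        let y := dot.2
        PySem.List.pySetD paper y (PySem.List.pySetD ((PySem.List.pyGet? paper y).getD []) x "#"))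
        ((PySem.List.pyRange 0 (MY+1)).map
          (fun _ => (PySem.List.pyRange 0 (MX+1)).map (fun _ => ("." : String))))).length := by omega
    rw [List.getElem?_eq_getElem hilt]
    have hBrow : ((PySem.List.pyRange 0 (MY+1)).map (fun y =>
        pvBuildRow (MX+1) (PySem.List.sorted (marks.getD y PySem.Set.empty) (fun v => v)) 0))[i]?
        = some (pvBuildRow (MX+1)
            (PySem.List.sorted (marks.getD (i:Int) PySem.Set.empty) (fun v => v)) 0) := by
      rw [PySem.List.pyRange_one 0 (MY+1)]
      simp [hi]
    rw [hBrow]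
    congr 1
    obtain ⟨hpw, hbd, hmem⟩ := hrowfacts i hi
    obtain ⟨hblen, hbget⟩ := pvBuildRow_get (MX+1)
      (PySem.List.sorted (marks.getD (i:Int) PySem.Set.empty) (fun v => v)) 0 le_rfl
      (by omega) hpw (by intro x hx; exact hbd x hx)
    apply List.ext_getElem?
    intro j
    by_cases hj : j < (MX+1).toNat
    · have hcellA := L3 i j hi hj
      rw [List.getElem?_eq_getElem hilt, Option.bind_some] at hcellA
      have hg0cell : (((PySem.List.pyRange 0 (MY+1)).map
          (fun _ => (PySem.List.pyRange 0 (MX+1)).map (fun _ => ("." : String))))[i]?.bind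
            (fun r => r[j]?)) = some "." := by
        rw [PySem.List.pyRange_one 0 (MY+1), PySem.List.pyRange_one 0 (MX+1)]
        simp [hi, hj]
      rw [hg0cell] at hcellA
      rw [hcellA]
      have hbj := hbget j (by omega)
      rw [show ((0:Int) + (j:Int)) = (j:Int) by omega] at hbj
      rw [hbj]
      have hbridge : pvHits (MX+1) (MY+1) dots j i ↔
          ((j:Int) ∈ PySem.List.sorted (marks.getD (i:Int) PySem.Set.empty) (fun v => v)) := by
        rw [hmem (j:Int)]
        unfold pvHits
        constructor
        · rintro ⟨d, hd, h1, h2⟩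
          obtain ⟨hx0, hy0⟩ := hall d hd
          have hm1 : PySem.Int.mod d.1 (MX+1) = d.1 := by
            rw [PySem.Int.mod_eq_emod_of_pos hX]
            exact Int.emod_eq_of_lt hx0 (hrange d hd).2.1
          have hm2 : PySem.Int.mod d.2 (MY+1) = d.2 := by
            rw [PySem.Int.mod_eq_emod_of_pos hY]
            exact Int.emod_eq_of_lt hy0 (hrange d hd).2.2.2
          rw [hm1] at h1; rw [hm2] at h2
          exact ⟨d, hd, by omega, by omega⟩
        · rintro ⟨d, hd, h1, h2⟩
          obtain ⟨hx0, hy0⟩ := hall d hd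
          have hm1 : PySem.Int.mod d.1 (MX+1) = d.1 := by
            rw [PySem.Int.mod_eq_emod_of_pos hX]
            exact Int.emod_eq_of_lt hx0 (hrange d hd).2.1
          have hm2 : PySem.Int.mod d.2 (MY+1) = d.2 := by
            rw [PySem.Int.mod_eq_emod_of_pos hY]
            exact Int.emod_eq_of_lt hy0 (hrange d hd).2.2.2
          exact ⟨d, hd, by rw [hm1]; omega, by rw [hm2]; omega⟩
      by_cases hh : pvHits (MX+1) (MY+1) dots j i
      · rw [if_pos hh, if_pos (hbridge.mp hh)]
      · rw [if_neg hh, if_neg (fun hb => hh (hbridge.mpr hb))]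
    · rw [List.getElem?_eq_none, List.getElem?_eq_none]
      · rw [hblen]; omega
      · have hmemr : (dots.foldl (fun paper dot =>
            let x := dot.1
            let y := dot.2
            PySem.List.pySetD paper y (PySem.List.pySetD ((PySem.List.pyGet? paper y).getD []) x "#"))
            ((PySem.List.pyRange 0 (MY+1)).map
              (fun _ => (PySem.List.pyRange 0 (MX+1)).map (fun _ => ("." : String)))))[i]'hilt ∈ _ :=
          List.getElem_mem _
        rw [L2 _ hmemr]
        omega
  · rw [List.getElem?_eq_none, List.getElem?_eq_none]
    · simp only [List.length_map]
      rw [PySem.List.length_pyRange_one]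
      omega
    · exact L1.trans_le (by omega)

-- ===== VERDICT (by name: the statement is the Claim_ definition above) =====
theorem create_paper_spec : Claim_equal_create_paper := by
  intro dots _ hpre
  unfold Spec_create_paper
  exact pvMain dots hpre.1 hpre.2
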